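-- pv_equiv track=rewrite | github.com/LightningDocs/KnacklyWebhookTesting | utilities.py | copy_created_dates
-- ===== SOURCE A (Python) =====
-- def copy_created_dates(previous_document: dict, new_document: dict) -> dict:
--     """Copies the created dates from a previous document into a new document.
--
--     Args:
--         previous_document (dict): A Knackly record document
--         new_document (dict): A Knackly record document
--
--     Returns:
--         dict: The new, modified document.
--     """
--     date_map = {
--         app["name"]: app.get("LD_createdDate") for app in previous_document["apps"]
--     }
--
--     # Iterate through the apps in the new dict
--     for app in new_document["apps"]:
--         # If the app name exists in the date_map, update the LD_creationDate in the new document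
--         if app["name"] in date_map and date_map[app["name"]] is not None:
--             app["LD_createdDate"] = date_map[app["name"]]
--
--     return new_document
-- ===== SOURCE B (Python) =====
-- def copy_created_dates(previous_document: dict, new_document: dict) -> dict:
--     """Copies the created dates from a previous document into a new document.
--
--     Inverted data flow: instead of indexing the previous apps by name and
--     looking each new app up, push dates forward.  Stage 1 snapshots the new
--     apps' names; stage 2 loops over the PREVIOUS apps in order and, for every
--     new position whose name matches, overwrites a pending date (so a later
--     previous app naturally wins); stage 3 commits the pending dates that are
--     not None into the new apps.
--     """
--     new_apps = new_document["apps"]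
--     names = [app["name"] for app in new_apps]
--     pending = [None for _ in names]
--     for prev in previous_document["apps"]:
--         pname = prev["name"]
--         date = prev.get("LD_createdDate")
--         pending = [date if n == pname else d for n, d in zip(names, pending)]
--     for app, date in zip(new_apps, pending):
--         if date is not None:
--             app["LD_createdDate"] = date
--     return new_document
-- ===== Notes on version B (the rewrite author's own statement) =====
-- stated objective: alternative
-- what changed: B inverts the data flow: it snapshots the new apps' names, then loops over the previous apps pushing each date onto every matching new position (later previous apps overwrite, reproducing last-wins), and finally commits the non-None pending dates; no name->date index and no per-new-app lookup exists.
import Mathlib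
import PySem

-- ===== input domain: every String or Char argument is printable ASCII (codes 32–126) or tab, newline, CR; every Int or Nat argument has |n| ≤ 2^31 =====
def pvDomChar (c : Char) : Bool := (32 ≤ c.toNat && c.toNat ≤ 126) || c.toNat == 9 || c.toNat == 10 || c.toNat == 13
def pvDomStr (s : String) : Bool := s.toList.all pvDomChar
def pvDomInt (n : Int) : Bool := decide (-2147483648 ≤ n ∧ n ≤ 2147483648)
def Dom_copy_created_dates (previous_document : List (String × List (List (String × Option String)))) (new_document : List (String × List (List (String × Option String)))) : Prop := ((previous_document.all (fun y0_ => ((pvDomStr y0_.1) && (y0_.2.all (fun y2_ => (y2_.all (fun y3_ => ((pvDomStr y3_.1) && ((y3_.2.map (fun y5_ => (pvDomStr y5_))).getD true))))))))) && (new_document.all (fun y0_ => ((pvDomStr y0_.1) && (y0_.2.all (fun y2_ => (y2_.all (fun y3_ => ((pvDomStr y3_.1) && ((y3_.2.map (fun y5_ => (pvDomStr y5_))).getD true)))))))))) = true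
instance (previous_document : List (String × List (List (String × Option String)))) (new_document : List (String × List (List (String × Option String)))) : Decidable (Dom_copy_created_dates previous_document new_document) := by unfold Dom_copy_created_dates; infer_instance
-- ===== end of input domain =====

-- B inverts the data flow: a pass over the previous apps pushes each date onto every matching new position
-- (later previous apps overwrite = last-wins), then the non-None pending dates are committed; no name index.
-- Both Pythons mutate new_document in place and return it; the equivalence proved here is about the return value.

-- ===== PORT A =====
-- A builds date_map (dict comprehension = insert-in-order, last wins), then updates each new app whose name maps to a non-None date.
def copy_created_dates (previous_document : List (String × List (List (String × Option String)))) (new_document : List (String × List (List (String × Option String)))) : List (String × List (List (String × Option String))) :=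
  let dateMap : PySem.Dict (Option String) (Option String) :=
    ((PySem.Dict.mk previous_document).getD "apps" []).foldl
      (fun m app => m.insert ((PySem.Dict.mk app).getD "name" none) ((PySem.Dict.mk app).getD "LD_createdDate" none))
      PySem.Dict.empty
  let newApps := ((PySem.Dict.mk new_document).getD "apps" []).map (fun app =>
    let n := (PySem.Dict.mk app).getD "name" none
    if dateMap.contains n && (dateMap.getD n none).isSome then
      ((PySem.Dict.mk app).insert "LD_createdDate" (dateMap.getD n none)).items
    else app)
  ((PySem.Dict.mk new_document).insert "apps" newApps).items

-- ===== PORT B =====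
-- B: snapshot the new apps' names; fold over the PREVIOUS apps overwriting a pending date at every matching
-- position (so the last matching previous app wins); commit the pending dates that are not None.
def copy_created_dates_alt (previous_document : List (String × List (List (String × Option String)))) (new_document : List (String × List (List (String × Option String)))) : List (String × List (List (String × Option String))) :=
  let newApps := (PySem.Dict.mk new_document).getD "apps" []
  let names := newApps.map (fun app => (PySem.Dict.mk app).getD "name" none)
  let pending : List (Option String) :=
    ((PySem.Dict.mk previous_document).getD "apps" []).foldl
      (fun pend prev =>
        let pname := (PySem.Dict.mk prev).getD "name" none
        let date := (PySem.Dict.mk prev).getD "LD_createdDate" none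
        (names.zip pend).map (fun q => if q.1 == pname then date else q.2))
      (names.map (fun _ => (none : Option String)))
  let newApps' := (newApps.zip pending).map (fun q =>
    match q.2 with
    | some d => ((PySem.Dict.mk q.1).insert "LD_createdDate" (some d)).items
    | none => q.1)
  ((PySem.Dict.mk new_document).insert "apps" newApps').items

-- ===== PRECONDITION & SPEC =====
-- Pre_ excludes exactly the inputs where Python A raises KeyError: a document without an "apps" key,
-- or an app (in either document's apps list) without a "name" key.
def Pre_copy_created_dates (previous_document : List (String × List (List (String × Option String)))) (new_document : List (String × List (List (String × Option String)))) : Prop :=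
  (PySem.Dict.mk previous_document).contains "apps" = true ∧
  (PySem.Dict.mk new_document).contains "apps" = true ∧
  (∀ app ∈ (PySem.Dict.mk previous_document).getD "apps" [], (PySem.Dict.mk app).contains "name" = true) ∧
  (∀ app ∈ (PySem.Dict.mk new_document).getD "apps" [], (PySem.Dict.mk app).contains "name" = true)
instance (previous_document : List (String × List (List (String × Option String)))) (new_document : List (String × List (List (String × Option String)))) : Decidable (Pre_copy_created_dates previous_document new_document) := by unfold Pre_copy_created_dates; infer_instance

def pvWitness_copy_created_dates : (List (String × List (List (String × Option String)))) × (List (String × List (List (String × Option String)))) :=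
  ([("apps", [[("name", some "x"), ("LD_createdDate", some "2020-01-01")]])],
   [("apps", [[("name", some "x")]])])

def Spec_copy_created_dates (previous_document : List (String × List (List (String × Option String)))) (new_document : List (String × List (List (String × Option String)))) (out : List (String × List (List (String × Option String)))) : Prop := out = copy_created_dates_alt previous_document new_document
instance (previous_document : List (String × List (List (String × Option String)))) (new_document : List (String × List (List (String × Option String)))) (out : List (String × List (List (String × Option String)))) : Decidable (Spec_copy_created_dates previous_document new_document out) := by unfold Spec_copy_created_dates; infer_instance

-- ===== CLAIM (what is proved, stated in full; the proofs are below) =====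
def Claim_equal_copy_created_dates : Prop := ∀ (previous_document : List (String × List (List (String × Option String)))) (new_document : List (String × List (List (String × Option String)))), Dom_copy_created_dates previous_document new_document → Pre_copy_created_dates previous_document new_document → Spec_copy_created_dates previous_document new_document (copy_created_dates previous_document new_document)

-- ===== LEMMAS AND PROOFS =====

-- Zipping a list with a map of itself and mapping is a single map.
theorem zip_map_map {α β γ : Type} (l : List α) (g : α → β) (h : α → β → γ) :
    (l.zip (l.map g)).map (fun q => h q.1 q.2) = l.map (fun n => h n (g n)) := by
  induction l with
  | nil => rfl
  | cons a as ih => simp [ih]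

-- Uncurried variant, matching the shape of B's final commit pass.
theorem zip_map_map' {α β γ : Type} (l : List α) (g : α → β) (h : α × β → γ) :
    (l.zip (l.map g)).map h = l.map (fun n => h (n, g n)) := by
  induction l with
  | nil => rfl
  | cons a as ih => simp [ih]

-- B's pending fold over the previous apps computes, at each position, the date of the LAST previous app
-- with that name (phrased as first hit of the reversed list), independently of the other positions.
theorem fold_pending_eq
    (apps : List (List (String × Option String))) (names : List (Option String))
    (g : Option String → Option String) :
    apps.foldl
      (fun pend prev =>
        (names.zip pend).map (fun q =>
          if q.1 == (PySem.Dict.mk prev).getD "name" none then (PySem.Dict.mk prev).getD "LD_createdDate" none else q.2))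
      (names.map g)
    = names.map (fun n =>
        match apps.reverse.find? (fun p => (PySem.Dict.mk p).getD "name" none == n) with
        | some p => (PySem.Dict.mk p).getD "LD_createdDate" none
        | none => g n) := by
  induction apps generalizing g with
  | nil => simp
  | cons a as ih =>
      rw [List.foldl_cons,
        zip_map_map names g (fun n d =>
          if n == (PySem.Dict.mk a).getD "name" none then (PySem.Dict.mk a).getD "LD_createdDate" none else d),
        ih]
      apply List.map_congr_left
      intro n _
      rw [List.reverse_cons, List.find?_append]
      cases h : as.reverse.find? (fun p => (PySem.Dict.mk p).getD "name" none == n) with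
      | some p => simp
      | none =>
          by_cases hn : (PySem.Dict.mk a).getD "name" none = n
          · simp [hn, List.find?]
          · simp [List.find?, beq_eq_false_iff_ne.mpr hn, beq_eq_false_iff_ne.mpr (Ne.symm hn)]

-- A's dict lookup equals a reversed linear search: the foldl-built map answers with the LAST insert for a key.
theorem foldl_insert_get?_eq_find?_reverse
    (apps : List (List (String × Option String))) (m : PySem.Dict (Option String) (Option String)) (n : Option String) :
    (apps.foldl (fun m app => m.insert ((PySem.Dict.mk app).getD "name" none) ((PySem.Dict.mk app).getD "LD_createdDate" none)) m).get? n
    = (match apps.reverse.find? (fun p => (PySem.Dict.mk p).getD "name" none == n) with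
       | some p => some ((PySem.Dict.mk p).getD "LD_createdDate" none)
       | none => m.get? n) := by
  induction apps generalizing m with
  | nil => simp
  | cons a as ih =>
      simp only [List.foldl_cons, List.reverse_cons, List.find?_append, ih]
      cases h : as.reverse.find? (fun p => (PySem.Dict.mk p).getD "name" none == n) with
      | some p => simp
      | none =>
          by_cases hn : (PySem.Dict.mk a).getD "name" none = n
          · simp [hn]
          · simp [beq_eq_false_iff_ne.mpr hn, PySem.Dict.get?_insert, Ne.symm hn]

-- ===== VERDICT (by name: the statement is the Claim_ definition above) =====
theorem copy_created_dates_spec : Claim_equal_copy_created_dates := by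
  intro pd nd _ _
  show _ = copy_created_dates_alt pd nd
  unfold copy_created_dates copy_created_dates_alt
  dsimp only
  rw [fold_pending_eq, List.map_map, zip_map_map']
  refine congrArg (fun l => ((PySem.Dict.mk nd).insert "apps" l).items) ?_
  apply List.map_congr_left
  intro app _
  have hget := foldl_insert_get?_eq_find?_reverse ((PySem.Dict.mk pd).getD "apps" [])
    PySem.Dict.empty ((PySem.Dict.mk app).getD "name" none)
  cases h : (((PySem.Dict.mk pd).getD "apps" []).reverse.find?
      (fun p => (PySem.Dict.mk p).getD "name" none == (PySem.Dict.mk app).getD "name" none)) with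
  | none =>
      rw [h] at hget
      simp only [PySem.Dict.get?_empty] at hget
      rw [PySem.Dict.contains_eq_isSome_get?, hget]
      simp [h]
  | some p =>
      rw [h] at hget
      simp only at hget
      rw [PySem.Dict.contains_eq_isSome_get?, hget, PySem.Dict.getD_of_get?_eq_some _ none hget]
      cases hd : (PySem.Dict.mk p).getD "LD_createdDate" none with
      | none => simp [h, hd]
      | some d => simp [h, hd]
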